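-- pv_equiv track=rewrite | github.com/yibei8811/algorithm | codingInterview/014/solution.py | solve
-- ===== SOURCE A (Python) =====
-- def solve(n):
--     result = 0
--     for i in range(1, n+1):
--         quotient = n // i
--         remainder = n % i
--         product = 1
--         for j in range(i):
--             if j < remainder:
--                 product = product * (quotient+1)
--             else:
--                 product = product * quotient
--         if product > result:
--             result = product
--     return result
-- ===== SOURCE B (Python) =====
-- def solve(n):
--     best = 0
--     for i in range(1, n + 1):
--         q, r = divmod(n, i)
--         best = max(best, (q + 1) ** r * q ** (i - r))
--     return best
-- ===== Notes on version B (the rewrite author's own statement) =====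
-- stated objective: faster
-- what changed: Replaces A's inner loop that multiplies the i equal-ish parts one by one with the closed-form power product (n//i+1)**(n%i) * (n//i)**(i-n%i), turning two nested passes into a single pass with fast exponentiation.
import Mathlib
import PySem

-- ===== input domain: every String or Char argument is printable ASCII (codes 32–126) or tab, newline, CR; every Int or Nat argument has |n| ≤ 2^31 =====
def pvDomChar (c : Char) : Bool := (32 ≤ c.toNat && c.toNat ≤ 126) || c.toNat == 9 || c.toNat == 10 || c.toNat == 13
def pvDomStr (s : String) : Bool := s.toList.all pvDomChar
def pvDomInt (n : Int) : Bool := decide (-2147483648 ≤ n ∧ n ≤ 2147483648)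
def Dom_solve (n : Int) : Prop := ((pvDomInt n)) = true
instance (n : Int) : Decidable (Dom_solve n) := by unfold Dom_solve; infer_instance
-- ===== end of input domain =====

-- B replaces A's inner loop (multiplying the i equal-ish parts one by one) by the
-- closed-form power product (q+1)^r * q^(i-r); one pass instead of two nested ones.

-- ===== PORT A =====
def solve (n : Int) : Int :=
  (PySem.List.pyRange 1 (n + 1) 1).foldl
    (fun result i =>
      let quotient := PySem.Int.floordiv n i
      let remainder := PySem.Int.mod n i
      let product := (PySem.List.pyRange 0 i 1).foldl
        (fun product j =>
          if j < remainder then product * (quotient + 1) else product * quotient) 1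
      if product > result then product else result) 0

-- ===== PORT B =====
def solve_alt (n : Int) : Int :=
  (PySem.List.pyRange 1 (n + 1) 1).foldl
    (fun best i =>
      let q := PySem.Int.floordiv n i
      let r := PySem.Int.mod n i
      max best ((q + 1) ^ r.toNat * q ^ (i - r).toNat)) 0

-- ===== PRECONDITION & SPEC =====
def Spec_solve (n : Int) (out : Int) : Prop := out = solve_alt n
instance (n : Int) (out : Int) : Decidable (Spec_solve n out) := by unfold Spec_solve; infer_instance

-- ===== CLAIM (what is proved, stated in full; the proofs are below) =====
def Claim_equal_solve : Prop := ∀ (n : Int), Dom_solve n → Spec_solve n (solve n)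

-- ===== LEMMAS AND PROOFS =====

-- folding "multiply by c" over any list is multiplication by c^length
lemma foldl_mul_const (c : Int) (l : List Int) (acc : Int) :
    l.foldl (fun p _ => p * c) acc = acc * c ^ l.length := by
  induction l generalizing acc with
  | nil => simp
  | cons x xs ih => simp [List.foldl_cons, ih, pow_succ]; ring

-- A's inner loop over range(i) in closed form
lemma inner_closed (q r i : Int) (hr0 : 0 ≤ r) (hri : r ≤ i) :
    (PySem.List.pyRange 0 i 1).foldl
      (fun p j => if j < r then p * (q + 1) else p * q) 1
      = (q + 1) ^ r.toNat * q ^ (i - r).toNat := by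
  rw [PySem.List.pyRange_one_append 0 r i hr0 hri, List.foldl_append]
  have h1 : (PySem.List.pyRange 0 r 1).foldl
      (fun p j => if j < r then p * (q + 1) else p * q) 1
      = (q + 1) ^ r.toNat := by
    have := List.foldl_ext (l := PySem.List.pyRange 0 r 1)
      (fun p j => if j < r then p * (q + 1) else p * q) (fun p _ => p * (q + 1)) 1
      (fun p j hj => by
        rw [PySem.List.mem_pyRange_one] at hj
        simp [if_pos hj.2])
    rw [this, foldl_mul_const]
    simp [PySem.List.length_pyRange_one]
  have h2 := List.foldl_ext (l := PySem.List.pyRange r i 1)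
      (fun p j => if j < r then p * (q + 1) else p * q) (fun p _ => p * q)
      ((q + 1) ^ r.toNat)
      (fun p j hj => by
        rw [PySem.List.mem_pyRange_one] at hj
        simp [if_neg (by omega : ¬ j < r)])
  rw [h1, h2, foldl_mul_const]
  simp [PySem.List.length_pyRange_one]

-- if-max bridge
lemma ite_gt_eq_max (p r : Int) : (if p > r then p else r) = max r p := by
  by_cases h : p > r <;> simp [max_def] <;> omega

-- ===== VERDICT (by name: the statement is the Claim_ definition above) =====
theorem solve_spec : Claim_equal_solve := by
  intro n _
  unfold Spec_solve solve solve_alt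
  apply List.foldl_ext
  intro acc i hi
  rw [PySem.List.mem_pyRange_one] at hi
  have hipos : (0 : Int) < i := hi.1
  have hr0 : 0 ≤ PySem.Int.mod n i := PySem.Int.mod_nonneg n hipos
  have hri : PySem.Int.mod n i ≤ i := le_of_lt (PySem.Int.mod_lt n hipos)
  simp only []
  rw [inner_closed _ _ _ hr0 hri, ite_gt_eq_max]
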